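-- pv_equiv track=rewrite | github.com/lyteabovenyte/Algorithms | Algorithms/Arrays/varinat_reorder_boolean.py | reorder_boolean
-- ===== SOURCE A (Python) =====
-- def reorder_boolean(arr):
--     i, k = 0, 0
--
--     while i < len(arr):
--         if arr[i] == False:
--             arr[i], arr[k] = arr[k], arr[i]
--             k += 1
--         i += 1
--     return arr
-- ===== SOURCE B (Python) =====
-- def reorder_boolean(arr):
--     falses = [x for x in arr if x == False]
--     trues = [x for x in arr if x != False]
--     arr[:] = falses + trues
--     return arr
-- ===== Notes on version B (the rewrite author's own statement) =====
-- stated objective: simpler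
-- what changed: Replaces the two-pointer in-place swap partition with two comprehension passes collecting falses and trues, concatenated and written back with slice assignment.
import Mathlib
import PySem

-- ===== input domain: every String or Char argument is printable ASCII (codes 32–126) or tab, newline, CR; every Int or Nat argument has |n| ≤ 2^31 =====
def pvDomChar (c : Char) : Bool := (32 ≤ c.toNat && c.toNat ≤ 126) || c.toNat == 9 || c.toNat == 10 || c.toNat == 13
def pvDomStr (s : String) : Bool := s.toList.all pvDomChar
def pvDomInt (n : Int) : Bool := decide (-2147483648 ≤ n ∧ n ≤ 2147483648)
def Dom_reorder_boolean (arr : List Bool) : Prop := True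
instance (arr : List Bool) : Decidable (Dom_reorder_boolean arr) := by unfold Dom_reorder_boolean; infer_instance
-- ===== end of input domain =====

-- B collects falses and trues in two passes and concatenates instead of A's two-pointer swap partition:
-- simpler decomposition, same return value; both Pythons mutate arr in place, the equivalence proved is about the return value.

-- ===== PORT A =====
-- while loop with indices i (scan) and k (write), swapping arr[i] and arr[k] when arr[i] == False
def reorderLoopA (arr : List Bool) (i k : Nat) : List Bool :=
  if h : i < arr.length then
    if arr.getD i false == false then
      let ai := arr.getD i false
      let ak := arr.getD k false
      reorderLoopA ((arr.set i ak).set k ai) (i + 1) (k + 1)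
    else
      reorderLoopA arr (i + 1) k
  else
    arr
termination_by arr.length - i
decreasing_by all_goals simp_all; omega

def reorder_boolean (arr : List Bool) : List Bool := reorderLoopA arr 0 0

-- ===== PORT B =====
def reorder_boolean_alt (arr : List Bool) : List Bool :=
  (arr.filter (fun x => x == false)) ++ (arr.filter (fun x => x != false))

-- ===== PRECONDITION & SPEC =====
def Spec_reorder_boolean (arr : List Bool) (out : List Bool) : Prop := out = reorder_boolean_alt arr
instance (arr : List Bool) (out : List Bool) : Decidable (Spec_reorder_boolean arr out) := by unfold Spec_reorder_boolean; infer_instance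

-- ===== CLAIM (what is proved, stated in full; the proofs are below) =====
def Claim_equal_reorder_boolean : Prop := ∀ (arr : List Bool), Dom_reorder_boolean arr → Spec_reorder_boolean arr (reorder_boolean arr)

-- ===== LEMMAS AND PROOFS =====

lemma filter_false_eq_replicate (l : List Bool) :
    l.filter (fun x => !x) = List.replicate (l.count false) false := by
  induction l with
  | nil => simp
  | cons b t ih => cases b <;> simp [List.count_cons, List.replicate_succ, ih]

lemma filter_true_eq_replicate (l : List Bool) :
    l.filter (fun x => x) = List.replicate (l.count true) true := by
  induction l with
  | nil => simp
  | cons b t ih => cases b <;> simp [List.count_cons, List.replicate_succ, ih]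

lemma repl_shift (n : Nat) (rs : List Bool) :
    List.replicate n true ++ (true :: rs) = true :: (List.replicate n true ++ rs) := by
  induction n with
  | zero => simp
  | succ n ih => simp [List.replicate_succ, ih]

lemma set_swap_eq (k m : Nat) (rs : List Bool) :
    (((List.replicate k false ++ (List.replicate m true ++ (false :: rs))).set (k+m) (decide (m ≠ 0))).set k false)
    = List.replicate (k+1) false ++ (List.replicate m true ++ rs) := by
  cases m with
  | zero => simp [List.replicate_succ']
  | succ m' =>
      cases m' with
      | zero => simp [List.set_append, List.replicate_succ']
      | succ m'' => simp [List.set_append, List.replicate_succ', List.replicate_succ, repl_shift]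

lemma getD_mid (k m : Nat) (b : Bool) (rs : List Bool) :
    (List.replicate k false ++ (List.replicate m true ++ (b :: rs))).getD (k+m) false = b := by
  simp [List.getD]

lemma getD_at_k (k m : Nat) (b : Bool) (rs : List Bool) :
    (List.replicate k false ++ (List.replicate m true ++ (b :: rs))).getD k false
      = (if m = 0 then b else true) := by
  cases m with
  | zero => simp [List.getD]
  | succ m' => simp [List.getD]

lemma loopA_inv (rest : List Bool) : ∀ (k m : Nat),
    reorderLoopA (List.replicate k false ++ (List.replicate m true ++ rest)) (k + m) k =
      List.replicate (k + rest.count false) false ++ List.replicate (m + rest.count true) true := by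
  induction rest with
  | nil =>
      intro k m
      simp [reorderLoopA]
  | cons b rs ih =>
      intro k m
      have hlen : k + m < (List.replicate k false ++ (List.replicate m true ++ (b :: rs))).length := by
        simp
      rw [reorderLoopA, dif_pos hlen]
      cases b with
      | false =>
          rw [getD_mid]
          simp only [BEq.rfl, if_true, getD_at_k]
          have hset : (if m = 0 then false else true) = (decide (m ≠ 0)) := by
            cases m <;> simp
          rw [hset, set_swap_eq]
          have harg : k + m + 1 = (k + 1) + m := by omega
          rw [harg, ih (k+1) m]
          simp only [List.count_cons]
          congr 2 <;> simp <;> omega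
      | true =>
          rw [getD_mid]
          rw [if_neg (by decide)]
          have hsh : List.replicate m true ++ (true :: rs) = List.replicate (m+1) true ++ rs := by
            simp [List.replicate_succ', repl_shift]
          have harg : k + m + 1 = k + (m + 1) := by omega
          rw [hsh, harg, ih k (m+1)]
          simp only [List.count_cons]
          congr 2 <;> simp <;> omega

theorem reorder_boolean_spec_aux (arr : List Bool) :
    reorder_boolean arr = reorder_boolean_alt arr := by
  have h := loopA_inv arr 0 0
  simp at h
  simp [reorder_boolean, reorder_boolean_alt, filter_false_eq_replicate, filter_true_eq_replicate, h]

-- ===== VERDICT (by name: the statement is the Claim_ definition above) =====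
theorem reorder_boolean_spec : Claim_equal_reorder_boolean := by
  intro arr _
  unfold Spec_reorder_boolean
  exact reorder_boolean_spec_aux arr
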